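-- pv_equiv track=rewrite | github.com/manwar/perlweeklychallenge-club | challenge-306/roger-bell-west/python/ch-1.py | oddsum
-- ===== SOURCE A (Python) =====
-- import collections
-- from itertools import islice
--
-- def sliding_window(iterable, n):
--     # sliding_window('ABCDEFG', 4) --> ABCD BCDE CDEF DEFG
--     it = iter(iterable)
--     window = collections.deque(islice(it, n), maxlen=n)
--     if len(window) == n:
--         yield tuple(window)
--     for x in it:
--         window.append(x)
--         yield tuple(window)
--
-- def oddsum(a):
--   out = sum(a)
--   l = 3
--   while l <= len(a):
--     for s in sliding_window(a, l):
--       out += sum(s)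
--     l += 2
--   return out
-- ===== SOURCE B (Python) =====
-- def oddsum(a):
--     n = len(a)
--     return sum(x * (((i + 1) * (n - i) + 1) // 2) for i, x in enumerate(a))
-- ===== Notes on version B (the rewrite author's own statement) =====
-- stated objective: faster
-- what changed: A enumerates every odd-length sliding window (via a deque generator) and sums each window; B makes a single pass, multiplying each element a[i] by the closed-form count ceil((i+1)*(n-i)/2) of odd-length windows containing index i.
import Mathlib
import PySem

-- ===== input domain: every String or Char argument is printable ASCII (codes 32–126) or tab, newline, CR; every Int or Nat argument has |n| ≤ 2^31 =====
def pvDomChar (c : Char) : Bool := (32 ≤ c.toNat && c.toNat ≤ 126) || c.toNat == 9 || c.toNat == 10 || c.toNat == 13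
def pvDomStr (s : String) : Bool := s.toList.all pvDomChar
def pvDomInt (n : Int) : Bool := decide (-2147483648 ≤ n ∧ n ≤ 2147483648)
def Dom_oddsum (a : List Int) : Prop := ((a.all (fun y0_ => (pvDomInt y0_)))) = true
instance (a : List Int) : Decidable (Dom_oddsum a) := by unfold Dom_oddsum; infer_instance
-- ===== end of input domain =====

-- B replaces A's cubic enumeration of all odd-length windows by a single pass:
-- each element a[i] is multiplied by the closed-form coefficient ceil((i+1)*(n-i)/2),
-- the number of odd-length windows containing index i (objective: faster).

-- ===== PORT A =====
-- sliding_window(iterable, n): deque of maxlen n; yields the initial window if it is full,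
-- then one window per remaining element (deque append drops from the left at capacity).
def swAux (n : Nat) (window : List Int) (rest : List Int) : List (List Int) :=
  match rest with
  | [] => []
  | x :: r =>
    let w := (window ++ [x]).drop (window.length + 1 - n)
    w :: swAux n w r

def sliding_window (xs : List Int) (n : Nat) : List (List Int) :=
  let w0 := xs.take n
  (if w0.length = n then [w0] else []) ++ swAux n w0 (xs.drop n)

-- the 'while l <= len(a): for s in sliding_window(a, l): out += sum(s); l += 2' loop of A
def oddsumLoop (a : List Int) (l : Nat) (out : Int) : Int :=
  if l ≤ a.length then
    oddsumLoop a (l + 2)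
      (out + (sliding_window a l).foldl (fun acc s => acc + s.foldl (· + ·) 0) 0)
  else out
termination_by a.length + 1 - l

def oddsum (a : List Int) : Int := oddsumLoop a 3 (a.foldl (· + ·) 0)

-- ===== PORT B =====
def oddsum_alt (a : List Int) : Int :=
  let n : Int := a.length
  (PySem.List.enumerate a 0).foldl
    (fun acc p => acc + p.2 * PySem.Int.floordiv ((p.1 + 1) * (n - p.1) + 1) 2) 0

-- ===== PRECONDITION & SPEC =====
def Spec_oddsum (a : List Int) (out : Int) : Prop := out = oddsum_alt a
instance (a : List Int) (out : Int) : Decidable (Spec_oddsum a out) := by unfold Spec_oddsum; infer_instance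

-- ===== CLAIM (what is proved, stated in full; the proofs are below) =====
def Claim_equal_oddsum : Prop := ∀ (a : List Int), Dom_oddsum a → Spec_oddsum a (oddsum a)

-- ===== LEMMAS AND PROOFS =====

-- total weight of all windows of length l, written over indices
def gwin (a : List Int) (l : Nat) : Int :=
  ∑ s ∈ Finset.range (a.length + 1 - l), ∑ j ∈ Finset.range l, a.getD (s + j) 0

-- A's inner 'for s in sliding_window(a, l): out += sum(s)' as a value
def wfold (a : List Int) (l : Nat) : Int :=
  (sliding_window a l).foldl (fun acc s => acc + s.foldl (· + ·) 0) 0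

lemma foldl_plus_sum (s : List Int) : ∀ init : Int, s.foldl (· + ·) init = init + s.sum := by
  induction s with
  | nil => intro init; simp
  | cons x t ih => intro init; simp [List.foldl_cons, ih (init + x)]; ring

lemma list_sum_getD (xs : List Int) :
    xs.sum = ∑ j ∈ Finset.range xs.length, xs.getD j 0 := by
  induction xs with
  | nil => simp
  | cons x t ih =>
    simp [List.length_cons, Finset.sum_range_succ', ih]
    ring

lemma sum_map_range {f : Nat → Int} (m : Nat) :
    ((List.range m).map f).sum = ∑ j ∈ Finset.range m, f j := by
  induction m with
  | zero => simp
  | succ m ih => simp [List.range_succ, Finset.sum_range_succ, ih]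

lemma window_sum (a : List Int) (s l : Nat) (h : s + l ≤ a.length) :
    ((a.drop s).take l).sum = ∑ j ∈ Finset.range l, a.getD (s + j) 0 := by
  rw [list_sum_getD]
  have hlen : ((a.drop s).take l).length = l := by
    simp [List.length_take, List.length_drop]; omega
  rw [hlen]
  refine Finset.sum_congr rfl ?_
  intro j hj
  rw [Finset.mem_range] at hj
  rw [List.getD_eq_getElem?_getD, List.getD_eq_getElem?_getD]
  rw [List.getElem?_take_of_lt hj, List.getElem?_drop]

lemma swAux_eq (a : List Int) (l : Nat) (hl : 1 ≤ l) :
    ∀ c s, c = a.length - l - s → s + l ≤ a.length →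
      swAux l ((a.drop s).take l) (a.drop (s + l)) =
        (List.range' (s + 1) c).map (fun t => (a.drop t).take l) := by
  intro c
  induction c with
  | zero =>
    intro s hc hsl
    have : a.length ≤ s + l := by omega
    rw [List.drop_eq_nil_of_le this]
    simp [swAux]
  | succ c ih =>
    intro s hc hsl
    have hlt : s + l < a.length := by omega
    have hwlen : ((a.drop s).take l).length = l := by
      simp [List.length_take, List.length_drop]; omega
    rw [List.drop_eq_getElem_cons hlt]
    rw [swAux]
    have hw : ((a.drop s).take l ++ [a[s + l]]).drop (((a.drop s).take l).length + 1 - l) =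
        (a.drop (s + 1)).take l := by
      rw [hwlen]
      have h1 : (a.drop s).take l ++ [a[s + l]] = (a.drop s).take (l + 1) := by
        rw [List.take_add_one]
        congr 1
        rw [List.getElem?_drop]
        rw [List.getElem?_eq_getElem (by omega)]
        rfl
      rw [h1]
      have : l + 1 - l = 1 := by omega
      rw [this, List.drop_take, List.drop_drop]
      norm_num
    rw [hw]
    have hrec : a.drop (s + l + 1) = a.drop ((s + 1) + l) := by congr 1; omega
    rw [hrec, ih (s + 1) (by omega) (by omega)]
    rw [List.range'_succ]
    simp

lemma sliding_window_eq (a : List Int) (l : Nat) (hl : 1 ≤ l) (hln : l ≤ a.length) :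
    sliding_window a l = (List.range (a.length + 1 - l)).map (fun s => (a.drop s).take l) := by
  show (if (a.take l).length = l then [a.take l] else []) ++ swAux l (a.take l) (a.drop l) = _
  have h0 : (a.take l).length = l := by simp [List.length_take]; omega
  rw [if_pos h0]
  have h1 : a.take l = (a.drop 0).take l := by simp
  have h2 : a.drop l = a.drop (0 + l) := by simp
  rw [h1, h2, swAux_eq a l hl (a.length - l) 0 (by omega) (by omega)]
  rw [List.range_eq_range']
  have : a.length + 1 - l = (a.length - l) + 1 := by omega
  rw [this, List.range'_succ]
  simp

lemma wfold_eq (a : List Int) (l : Nat) (hl : 1 ≤ l) (hln : l ≤ a.length) :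
    wfold a l = gwin a l := by
  unfold wfold
  rw [sliding_window_eq a l hl hln]
  have hfold : ∀ (ws : List (List Int)),
      ws.foldl (fun acc s => acc + s.foldl (· + ·) 0) 0 = (ws.map (fun s => s.sum)).sum := by
    intro ws
    have := PySem.List.foldl_add ws (fun s : List Int => s.foldl (· + ·) 0) 0
    rw [this, zero_add]
    apply congrArg
    apply List.map_congr_left
    intro s _
    rw [foldl_plus_sum s 0, zero_add]
  rw [hfold, List.map_map]
  rw [sum_map_range]
  unfold gwin
  refine Finset.sum_congr rfl ?_
  intro s hs
  rw [Finset.mem_range] at hs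
  exact window_sum a s l (by omega)

lemma loop_eq (a : List Int) :
    ∀ d j out, (a.length + 1) / 2 - j ≤ d →
      oddsumLoop a (2 * j + 1) out =
        out + ∑ k ∈ Finset.Ico j ((a.length + 1) / 2), wfold a (2 * k + 1) := by
  intro d
  induction d with
  | zero =>
    intro j out h
    have hj : ¬ (2 * j + 1 ≤ a.length) := by omega
    rw [oddsumLoop, if_neg hj]
    rw [Finset.Ico_eq_empty (by omega)]
    simp
  | succ d ih =>
    intro j out h
    by_cases hc : 2 * j + 1 ≤ a.length
    · rw [oddsumLoop, if_pos hc]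
      have h3 : 2 * j + 1 + 2 = 2 * (j + 1) + 1 := by omega
      rw [h3, ih (j + 1) _ (by omega)]
      have hjK : j < (a.length + 1) / 2 := by omega
      rw [Finset.sum_eq_sum_Ico_succ_bot hjK (fun k => wfold a (2 * k + 1))]
      show out + wfold a (2 * j + 1) + _ = _
      ring
    · rw [oddsumLoop, if_neg hc]
      rw [Finset.Ico_eq_empty (by omega)]
      simp

lemma sumId (M : Nat) : 2 * ∑ k ∈ Finset.range M, (k : ℤ) = M * (M - 1) := by
  induction M with
  | zero => simp
  | succ M ih =>
    rw [Finset.sum_range_succ]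
    push_cast
    push_cast at ih
    linear_combination ih

-- number of odd-length windows of a length-n list containing index i, summed per length,
-- equals ceil((i+1)*(n-i)/2)
lemma cnt_eq (n i : Nat) (h : i < n) :
    ∑ k ∈ Finset.range ((n + 1) / 2),
        (((Finset.range (n - 2 * k)).filter (fun s => s ≤ i ∧ i < s + (2 * k + 1))).card : ℤ) =
      (((i : ℤ) + 1) * ((n : ℤ) - (i : ℤ)) + 1) / 2 := by
  set K := (n + 1) / 2 with hK
  set t := (n + 1 - i) / 2 with ht
  set m := (i + 1) / 2 with hm
  have htK : t ≤ K := by omega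
  have hmK : m ≤ K := by omega
  have step1 : ∀ k ∈ Finset.range K,
      (((Finset.range (n - 2 * k)).filter (fun s => s ≤ i ∧ i < s + (2 * k + 1))).card : ℤ) =
        (if k < t then (i : ℤ) + 1 else (n : ℤ) - 2 * k) -
          (if k < m then (i : ℤ) - 2 * k else 0) := by
    intro k hk
    rw [Finset.mem_range] at hk
    have hfil : (Finset.range (n - 2 * k)).filter (fun s => s ≤ i ∧ i < s + (2 * k + 1)) =
        Finset.Icc (i - 2 * k) (min i (n - 1 - 2 * k)) := by
      ext s
      simp only [Finset.mem_filter, Finset.mem_range, Finset.mem_Icc]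
      omega
    rw [hfil, Nat.card_Icc]
    split_ifs <;> omega
  rw [Finset.sum_congr rfl step1, Finset.sum_sub_distrib]
  have hS1 : ∑ k ∈ Finset.range K, (if k < t then (i : ℤ) + 1 else (n : ℤ) - 2 * k) =
      t * ((i : ℤ) + 1) + (((K : ℤ) - t) * n -
        2 * ((∑ k ∈ Finset.range K, (k : ℤ)) - ∑ k ∈ Finset.range t, (k : ℤ))) := by
    rw [Finset.range_eq_Ico, ← Finset.sum_Ico_consecutive _ (Nat.zero_le t) htK]
    have e1 : ∑ k ∈ Finset.Ico 0 t, (if k < t then (i : ℤ) + 1 else (n : ℤ) - 2 * k) =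
        t * ((i : ℤ) + 1) := by
      rw [Finset.sum_congr rfl (fun k hk => if_pos (by
        rw [Finset.mem_Ico] at hk; omega))]
      rw [Finset.sum_const, Nat.card_Ico, nsmul_eq_mul]
      simp only [Nat.sub_zero]
    have e2 : ∑ k ∈ Finset.Ico t K, (if k < t then (i : ℤ) + 1 else (n : ℤ) - 2 * k) =
        ((K : ℤ) - t) * n - 2 * ((∑ k ∈ Finset.range K, (k : ℤ)) - ∑ k ∈ Finset.range t, (k : ℤ)) := by
      rw [Finset.sum_congr rfl (fun k hk => if_neg (by
        rw [Finset.mem_Ico] at hk; omega))]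
      rw [Finset.sum_sub_distrib, Finset.sum_const, Nat.card_Ico, nsmul_eq_mul]
      rw [← Finset.mul_sum, Finset.sum_Ico_eq_sub _ htK]
      push_cast [Nat.cast_sub htK]
      ring
    rw [e1, e2]
    simp only [Nat.Ico_zero_eq_range]
  have hS2 : ∑ k ∈ Finset.range K, (if k < m then (i : ℤ) - 2 * k else 0) =
      m * (i : ℤ) - 2 * ∑ k ∈ Finset.range m, (k : ℤ) := by
    rw [Finset.range_eq_Ico, ← Finset.sum_Ico_consecutive _ (Nat.zero_le m) hmK]
    have e1 : ∑ k ∈ Finset.Ico 0 m, (if k < m then (i : ℤ) - 2 * k else 0) =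
        m * (i : ℤ) - 2 * ∑ k ∈ Finset.range m, (k : ℤ) := by
      rw [Finset.sum_congr rfl (fun k hk => if_pos (by
        rw [Finset.mem_Ico] at hk; omega))]
      rw [Finset.sum_sub_distrib, Finset.sum_const, Nat.card_Ico, nsmul_eq_mul]
      rw [← Finset.mul_sum]
      simp only [Nat.sub_zero, Finset.range_eq_Ico]
    have e2 : ∑ k ∈ Finset.Ico m K, (if k < m then (i : ℤ) - 2 * k else 0) = 0 := by
      rw [Finset.sum_congr rfl (fun k hk => if_neg (by
        rw [Finset.mem_Ico] at hk; omega))]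
      simp
    rw [e1, e2, add_zero]
    simp only [Nat.Ico_zero_eq_range]
  rw [hS1, hS2]
  have hGK := sumId K
  have hGt := sumId t
  have hGm := sumId m
  rcases Nat.even_or_odd n with ⟨x, hx⟩ | ⟨x, hx⟩ <;>
    rcases Nat.even_or_odd i with ⟨y, hy⟩ | ⟨y, hy⟩
  · -- n = x + x, i = y + y
    have hKZ : (K : ℤ) = x := by omega
    have htZ : (t : ℤ) = (x : ℤ) - y := by omega
    have hmZ : (m : ℤ) = y := by omega
    have hnZ : (n : ℤ) = 2 * x := by omega
    have hiZ : (i : ℤ) = 2 * y := by omega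
    have hnum : ((i : ℤ) + 1) * ((n : ℤ) - i) + 1 =
        2 * (2 * x * y - 2 * y ^ 2 + x - y) + 1 := by rw [hnZ, hiZ]; ring
    rw [hnum, show (2 * (2 * (x:ℤ) * y - 2 * y ^ 2 + x - y) + 1) / 2 =
        2 * x * y - 2 * y ^ 2 + x - y from by omega]
    rw [hKZ] at hGK
    rw [htZ] at hGt
    rw [hmZ] at hGm
    rw [hKZ, htZ, hmZ, hnZ, hiZ]
    linear_combination (-1 : ℤ) * hGK + hGt + hGm
  · -- n = x + x, i = 2 * y + 1
    have hKZ : (K : ℤ) = x := by omega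
    have htZ : (t : ℤ) = (x : ℤ) - y := by omega
    have hmZ : (m : ℤ) = (y : ℤ) + 1 := by omega
    have hnZ : (n : ℤ) = 2 * x := by omega
    have hiZ : (i : ℤ) = 2 * y + 1 := by omega
    have hnum : ((i : ℤ) + 1) * ((n : ℤ) - i) + 1 =
        2 * (2 * x * y + 2 * x - 2 * y ^ 2 - 3 * y - 1) + 1 := by rw [hnZ, hiZ]; ring
    rw [hnum, show (2 * (2 * (x:ℤ) * y + 2 * x - 2 * y ^ 2 - 3 * y - 1) + 1) / 2 =
        2 * x * y + 2 * x - 2 * y ^ 2 - 3 * y - 1 from by omega]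
    rw [hKZ] at hGK
    rw [htZ] at hGt
    rw [hmZ] at hGm
    rw [hKZ, htZ, hmZ, hnZ, hiZ]
    linear_combination (-1 : ℤ) * hGK + hGt + hGm
  · -- n = 2 * x + 1, i = y + y
    have hKZ : (K : ℤ) = (x : ℤ) + 1 := by omega
    have htZ : (t : ℤ) = (x : ℤ) - y + 1 := by omega
    have hmZ : (m : ℤ) = y := by omega
    have hnZ : (n : ℤ) = 2 * x + 1 := by omega
    have hiZ : (i : ℤ) = 2 * y := by omega
    have hnum : ((i : ℤ) + 1) * ((n : ℤ) - i) + 1 =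
        2 * (2 * x * y + x - 2 * y ^ 2 + 1) := by rw [hnZ, hiZ]; ring
    rw [hnum, show (2 * (2 * (x:ℤ) * y + x - 2 * y ^ 2 + 1)) / 2 =
        2 * x * y + x - 2 * y ^ 2 + 1 from by omega]
    rw [hKZ] at hGK
    rw [htZ] at hGt
    rw [hmZ] at hGm
    rw [hKZ, htZ, hmZ, hnZ, hiZ]
    linear_combination (-1 : ℤ) * hGK + hGt + hGm
  · -- n = 2 * x + 1, i = 2 * y + 1
    have hKZ : (K : ℤ) = (x : ℤ) + 1 := by omega
    have htZ : (t : ℤ) = (x : ℤ) - y := by omega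
    have hmZ : (m : ℤ) = (y : ℤ) + 1 := by omega
    have hnZ : (n : ℤ) = 2 * x + 1 := by omega
    have hiZ : (i : ℤ) = 2 * y + 1 := by omega
    have hnum : ((i : ℤ) + 1) * ((n : ℤ) - i) + 1 =
        2 * (2 * x * y - 2 * y ^ 2 + 2 * x - 2 * y) + 1 := by rw [hnZ, hiZ]; ring
    rw [hnum, show (2 * (2 * (x:ℤ) * y - 2 * y ^ 2 + 2 * x - 2 * y) + 1) / 2 =
        2 * x * y - 2 * y ^ 2 + 2 * x - 2 * y from by omega]
    rw [hKZ] at hGK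
    rw [htZ] at hGt
    rw [hmZ] at hGm
    rw [hKZ, htZ, hmZ, hnZ, hiZ]
    linear_combination (-1 : ℤ) * hGK + hGt + hGm

lemma inner_as_ite (a : List Int) (s l : Nat) (hsl : s + l ≤ a.length) :
    ∑ j ∈ Finset.range l, a.getD (s + j) 0 =
      ∑ i ∈ Finset.range a.length, if s ≤ i ∧ i < s + l then a.getD i 0 else 0 := by
  rw [← Finset.sum_filter]
  have hset : (Finset.range a.length).filter (fun i => s ≤ i ∧ i < s + l) = Finset.Ico s (s + l) := by
    ext i
    simp only [Finset.mem_filter, Finset.mem_range, Finset.mem_Ico]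
    omega
  rw [hset, Finset.sum_Ico_eq_sum_range]
  have : s + l - s = l := by omega
  rw [this]

lemma interchange (a : List Int) :
    ∑ k ∈ Finset.range ((a.length + 1) / 2), gwin a (2 * k + 1) =
      ∑ i ∈ Finset.range a.length,
        a.getD i 0 *
          ∑ k ∈ Finset.range ((a.length + 1) / 2),
            (((Finset.range (a.length - 2 * k)).filter
              (fun s => s ≤ i ∧ i < s + (2 * k + 1))).card : ℤ) := by
  have step1 : ∀ k, gwin a (2 * k + 1) =
      ∑ i ∈ Finset.range a.length,
        a.getD i 0 * (((Finset.range (a.length - 2 * k)).filter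
          (fun s => s ≤ i ∧ i < s + (2 * k + 1))).card : ℤ) := by
    intro k
    unfold gwin
    have hrng : a.length + 1 - (2 * k + 1) = a.length - 2 * k := by omega
    rw [hrng]
    have hinner : ∀ s ∈ Finset.range (a.length - 2 * k),
        ∑ j ∈ Finset.range (2 * k + 1), a.getD (s + j) 0 =
          ∑ i ∈ Finset.range a.length, if s ≤ i ∧ i < s + (2 * k + 1) then a.getD i 0 else 0 := by
      intro s hs
      rw [Finset.mem_range] at hs
      exact inner_as_ite a s (2 * k + 1) (by omega)
    rw [Finset.sum_congr rfl hinner, Finset.sum_comm]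
    refine Finset.sum_congr rfl ?_
    intro i _
    rw [← Finset.sum_filter]
    rw [Finset.sum_const, nsmul_eq_mul]
    ring
  rw [Finset.sum_congr rfl (fun k _ => step1 k), Finset.sum_comm]
  refine Finset.sum_congr rfl ?_
  intro i _
  rw [Finset.mul_sum]

lemma enum_map_sum (f : Int → Int → Int) :
    ∀ (xs : List Int) (s : Int),
      ((PySem.List.enumerate xs s).map (fun p => f p.1 p.2)).sum =
        ∑ j ∈ Finset.range xs.length, f (s + j) (xs.getD j 0) := by
  intro xs
  induction xs with
  | nil => intro s; simp [PySem.List.enumerate_nil]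
  | cons x t ih =>
    intro s
    rw [PySem.List.enumerate_cons, List.map_cons, List.sum_cons, ih (s + 1)]
    rw [List.length_cons, Finset.sum_range_succ']
    simp only [List.getD_cons_succ, List.getD_cons_zero]
    conv_rhs => rw [add_comm]
    congr 1
    · norm_num
    refine Finset.sum_congr rfl ?_
    intro j _
    congr 1
    push_cast
    ring

lemma alt_eq (a : List Int) :
    oddsum_alt a =
      ∑ i ∈ Finset.range a.length,
        a.getD i 0 * ((((i : ℤ) + 1) * ((a.length : ℤ) - (i : ℤ)) + 1) / 2) := by
  unfold oddsum_alt
  rw [PySem.List.foldl_add (PySem.List.enumerate a 0)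
    (fun p : Int × Int => p.2 * PySem.Int.floordiv ((p.1 + 1) * ((a.length : Int) - p.1) + 1) 2) 0,
    zero_add]
  rw [enum_map_sum (fun i x => x * PySem.Int.floordiv ((i + 1) * ((a.length : Int) - i) + 1) 2) a 0]
  refine Finset.sum_congr rfl ?_
  intro i _
  rw [PySem.Int.floordiv_eq_ediv_of_pos (by norm_num)]
  ring_nf

-- ===== VERDICT (by name: the statement is the Claim_ definition above) =====
theorem oddsum_spec : Claim_equal_oddsum := by
  intro a _
  unfold Spec_oddsum
  rw [alt_eq]
  by_cases hn : a.length = 0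
  · have ha : a = [] := List.length_eq_zero_iff.mp hn
    subst ha
    rw [oddsum, oddsumLoop]
    rfl
  · unfold oddsum
    rw [show (3 : Nat) = 2 * 1 + 1 from rfl,
      loop_eq a ((a.length + 1) / 2) 1 _ (by omega)]
    rw [foldl_plus_sum a 0, zero_add]
    have hwg : ∀ k ∈ Finset.Ico 1 ((a.length + 1) / 2), wfold a (2 * k + 1) = gwin a (2 * k + 1) := by
      intro k hk
      rw [Finset.mem_Ico] at hk
      exact wfold_eq a (2 * k + 1) (by omega) (by omega)
    rw [Finset.sum_congr rfl hwg]
    have hg1 : gwin a (2 * 0 + 1) = a.sum := by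
      unfold gwin
      rw [show a.length + 1 - (2 * 0 + 1) = a.length from by omega]
      rw [list_sum_getD]
      refine Finset.sum_congr rfl ?_
      intro s _
      rw [Finset.sum_range_one, add_zero]
    have hK0 : 0 < (a.length + 1) / 2 := by omega
    have hsplit := Finset.sum_eq_sum_Ico_succ_bot hK0 (fun k => gwin a (2 * k + 1))
    have : a.sum + ∑ k ∈ Finset.Ico 1 ((a.length + 1) / 2), gwin a (2 * k + 1) =
        ∑ k ∈ Finset.range ((a.length + 1) / 2), gwin a (2 * k + 1) := by
      rw [Finset.range_eq_Ico, hsplit, hg1]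
    rw [this, interchange]
    refine Finset.sum_congr rfl ?_
    intro i hi
    rw [Finset.mem_range] at hi
    rw [cnt_eq a.length i hi]
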